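-- pv_equiv track=rewrite | github.com/devlinux-tips/rag | services/rag-service/src/preprocessing/chunkers.py | sentence_chunk_positions
-- ===== SOURCE A (Python) =====
-- def sentence_chunk_positions(
--     sentences: list[str], chunk_size: int, overlap: int, min_chunk_size: int
-- ) -> list[tuple[int, int, list[str]]]:
--     """
--     Calculate chunk positions for sentence-based strategy (pure function).
--
--     Args:
--         sentences: List of sentences
--         chunk_size: Target chunk size in characters
--         overlap: Overlap between chunks in characters
--         min_chunk_size: Minimum chunk size
--
--     Returns:
--         List of (start_idx, end_idx, sentence_group) tuples
--     """
--     if not sentences: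
--         return []
--
--     chunks = []
--     current_sentences: list[str] = []
--     current_length = 0
--     start_idx = 0
--
--     for i, sentence in enumerate(sentences):
--         sentence_length = len(sentence)
--
--         # Check if we should create a chunk
--         should_chunk = (
--             current_length + sentence_length > chunk_size and current_sentences and current_length >= min_chunk_size
--         )
--
--         if should_chunk:
--             chunks.append((start_idx, i, current_sentences.copy()))
--
--             # Handle overlap
--             if overlap > 0 and current_sentences:
--                 overlap_sentences: list[str] = []
--                 overlap_length = 0
--
--                 for sent in reversed(current_sentences):
--                     if overlap_length + len(sent) <= overlap:
--                         overlap_sentences.insert(0, sent)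
--                         overlap_length += len(sent)
--                     else:
--                         break
--
--                 current_sentences = overlap_sentences
--                 current_length = overlap_length
--                 start_idx = i - len(overlap_sentences)
--             else:
--                 current_sentences = []
--                 current_length = 0
--                 start_idx = i
--
--         current_sentences.append(sentence)
--         current_length += sentence_length
--
--     # Handle remaining sentences
--     if current_sentences:
--         chunks.append((start_idx, len(sentences), current_sentences))
--
--     return chunks
-- ===== SOURCE B (Python) =====
-- from bisect import bisect_left
--
--
-- def sentence_chunk_positions(sentences, chunk_size, overlap, min_chunk_size):
--     """Index-window re-implementation: prefix sums of sentence lengths + bisect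
--     for the overlap cut instead of a growing buffer and a reverse scan."""
--     if not sentences:
--         return []
--     n = len(sentences)
--     pref = [0]
--     total = 0
--     for s in sentences:
--         total += len(s)
--         pref.append(total)
--
--     chunks = []
--     start = 0
--     for i in range(n):
--         if (
--             pref[i + 1] - pref[start] > chunk_size
--             and start < i
--             and pref[i] - pref[start] >= min_chunk_size
--         ):
--             chunks.append((start, i, sentences[start:i]))
--             if overlap > 0:
--                 # smallest j in [start, i] with pref[i] - pref[j] <= overlap
--                 start = start + bisect_left(pref[start:i + 1], pref[i] - overlap)
--             else:
--                 start = i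
--
--     chunks.append((start, n, sentences[start:n]))
--     return chunks
-- ===== Notes on version B (the rewrite author's own statement) =====
-- stated objective: alternative
-- what changed: Replaces the growing sentence buffer and the per-chunk reverse scan with a prefix-sum array of sentence lengths, an index window [start, i) emitted as a slice, and a bisect_left on the monotone prefix array to find the overlap cut.
import Mathlib
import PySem

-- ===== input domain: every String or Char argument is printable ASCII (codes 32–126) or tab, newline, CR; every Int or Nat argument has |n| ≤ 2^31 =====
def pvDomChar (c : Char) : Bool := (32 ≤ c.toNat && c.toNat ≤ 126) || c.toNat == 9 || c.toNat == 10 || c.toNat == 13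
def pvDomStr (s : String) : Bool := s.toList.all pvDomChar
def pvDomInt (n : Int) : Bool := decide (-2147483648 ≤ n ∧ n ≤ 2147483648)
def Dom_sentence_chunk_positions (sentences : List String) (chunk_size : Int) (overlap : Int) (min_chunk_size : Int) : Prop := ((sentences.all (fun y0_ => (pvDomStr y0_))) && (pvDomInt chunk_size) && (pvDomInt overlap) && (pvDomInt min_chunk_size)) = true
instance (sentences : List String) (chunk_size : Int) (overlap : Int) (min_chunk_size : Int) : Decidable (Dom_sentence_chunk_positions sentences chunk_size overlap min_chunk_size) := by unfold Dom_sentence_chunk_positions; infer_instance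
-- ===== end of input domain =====

-- ===== PORT A =====
-- B replaces A's growing buffer + per-chunk reverse scan by prefix sums, an index window and bisect_left (a different algorithm of similar cost).

-- inner 'for sent in reversed(current_sentences)' loop with its break (builds overlap_sentences front-first)
def pvA_overlapScan (overlap : Int) : List String → List String → Int → List String × Int
  | [], acc, ol => (acc, ol)
  | s :: rest, acc, ol =>
    if ol + PySem.Str.len s ≤ overlap then
      pvA_overlapScan overlap rest (s :: acc) (ol + PySem.Str.len s)
    else (acc, ol)

-- body of 'for i, sentence in enumerate(sentences)'
def pvA_step (chunk_size overlap min_chunk_size : Int)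
    (st : List (Int × Int × List String) × List String × Int × Int) (p : Int × String) :
    List (Int × Int × List String) × List String × Int × Int :=
  let chunks := st.1
  let cur := st.2.1
  let curLen := st.2.2.1
  let start := st.2.2.2
  let i := p.1
  let sl := PySem.Str.len p.2
  if curLen + sl > chunk_size ∧ cur ≠ [] ∧ curLen ≥ min_chunk_size then
    let chunks' := chunks ++ [(start, i, cur)]
    if overlap > 0 ∧ cur ≠ [] then
      let r := pvA_overlapScan overlap cur.reverse [] 0
      (chunks', r.1 ++ [p.2], r.2 + sl, i - (r.1.length : Int))
    else
      (chunks', [p.2], sl, i)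
  else
    (chunks, cur ++ [p.2], curLen + sl, start)

def sentence_chunk_positions (sentences : List String) (chunk_size : Int) (overlap : Int) (min_chunk_size : Int) : List (Int × Int × List String) :=
  if sentences = [] then []
  else
    let st := (PySem.List.enumerate sentences).foldl (pvA_step chunk_size overlap min_chunk_size) ([], [], 0, 0)
    if st.2.1 ≠ [] then st.1 ++ [(st.2.2.2, (sentences.length : Int), st.2.1)] else st.1

-- ===== PORT B =====

-- 'pref = [0]; total = 0; for s in sentences: total += len(s); pref.append(total)'
def pvB_pref (sentences : List String) : List Int :=
  (sentences.foldl (fun (pt : List Int × Int) s =>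
    (pt.1 ++ [pt.2 + PySem.Str.len s], pt.2 + PySem.Str.len s)) ([0], 0)).1

-- body of 'for i in range(n)'
def pvB_step (sentences : List String) (pref : List Int) (chunk_size overlap min_chunk_size : Int)
    (st : List (Int × Int × List String) × Nat) (i : Nat) :
    List (Int × Int × List String) × Nat :=
  let chunks := st.1
  let start := st.2
  if PySem.List.pyGetD pref ((i : Int) + 1) 0 - PySem.List.pyGetD pref (start : Int) 0 > chunk_size
      ∧ start < i
      ∧ PySem.List.pyGetD pref (i : Int) 0 - PySem.List.pyGetD pref (start : Int) 0 ≥ min_chunk_size then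
    let chunks' := chunks ++ [((start : Int), (i : Int), PySem.List.slice sentences (some (start : Int)) (some (i : Int)))]
    if overlap > 0 then
      (chunks', start + PySem.List.bisectLeft (PySem.List.slice pref (some (start : Int)) (some ((i : Int) + 1))) (PySem.List.pyGetD pref (i : Int) 0 - overlap))
    else
      (chunks', i)
  else st

def sentence_chunk_positions_alt (sentences : List String) (chunk_size : Int) (overlap : Int) (min_chunk_size : Int) : List (Int × Int × List String) :=
  if sentences = [] then []
  else
    let pref := pvB_pref sentences
    let st := (List.range sentences.length).foldl (pvB_step sentences pref chunk_size overlap min_chunk_size) ([], 0)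
    st.1 ++ [((st.2 : Int), (sentences.length : Int), PySem.List.slice sentences (some (st.2 : Int)) none)]

-- ===== PRECONDITION & SPEC =====
def Spec_sentence_chunk_positions (sentences : List String) (chunk_size : Int) (overlap : Int) (min_chunk_size : Int) (out : List (Int × Int × List String)) : Prop := out = sentence_chunk_positions_alt sentences chunk_size overlap min_chunk_size
instance (sentences : List String) (chunk_size : Int) (overlap : Int) (min_chunk_size : Int) (out : List (Int × Int × List String)) : Decidable (Spec_sentence_chunk_positions sentences chunk_size overlap min_chunk_size out) := by unfold Spec_sentence_chunk_positions; infer_instance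

-- ===== CLAIM (what is proved, stated in full; the proofs are below) =====
def Claim_equal_sentence_chunk_positions : Prop := ∀ (sentences : List String) (chunk_size : Int) (overlap : Int) (min_chunk_size : Int), Dom_sentence_chunk_positions sentences chunk_size overlap min_chunk_size → Spec_sentence_chunk_positions sentences chunk_size overlap min_chunk_size (sentence_chunk_positions sentences chunk_size overlap min_chunk_size)

-- ===== LEMMAS AND PROOFS =====


-- total character length of a list of sentences, and prefix sums of it
def pvLenSum (l : List String) : Int := (l.map PySem.Str.len).sum
def pvPf (l : List String) (k : Nat) : Int := pvLenSum (l.take k)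

-- mirror of pvA_overlapScan that only counts how many sentences the scan keeps
def pvKeep (ov : Int) : Int → List String → Nat
  | _, [] => 0
  | ol, s :: r => if ol + PySem.Str.len s ≤ ov then pvKeep ov (ol + PySem.Str.len s) r + 1 else 0

lemma pvLen_nonneg (s : String) : 0 ≤ PySem.Str.len s := by
  rw [PySem.Str.len_eq]; exact Int.natCast_nonneg _

lemma pvLenSum_cons (s : String) (l : List String) :
    pvLenSum (s :: l) = PySem.Str.len s + pvLenSum l := by simp [pvLenSum]

lemma pvLenSum_nonneg (l : List String) : 0 ≤ pvLenSum l := by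
  induction l with
  | nil => simp [pvLenSum]
  | cons s l ih => rw [pvLenSum_cons]; have := pvLen_nonneg s; linarith

lemma pvLenSum_reverse (l : List String) : pvLenSum l.reverse = pvLenSum l := by
  simp [pvLenSum]

lemma pvPf_zero (l : List String) : pvPf l 0 = 0 := rfl

lemma pvPf_sub (l : List String) (j m : Nat) :
    pvLenSum ((l.drop j).take m) = pvPf l (j + m) - pvPf l j := by
  have h : l.take (j + m) = l.take j ++ (l.drop j).take m := List.take_add
  unfold pvPf
  rw [h]
  simp [pvLenSum]

lemma pvPf_succ (l : List String) (k : Nat) (h : k < l.length) :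
    pvPf l (k + 1) = pvPf l k + PySem.Str.len l[k] := by
  have h1 := pvPf_sub l k 1
  have h2 : (l.drop k).take 1 = [l[k]] := by
    rw [List.drop_eq_getElem_cons h]; rfl
  rw [h2] at h1
  have h3 : pvLenSum [l[k]] = PySem.Str.len l[k] := by simp [pvLenSum]
  rw [h3] at h1
  linarith

lemma pvPf_mono (l : List String) {j k : Nat} (h : j ≤ k) : pvPf l j ≤ pvPf l k := by
  have h1 := pvPf_sub l j (k - j)
  have h2 : j + (k - j) = k := by omega
  rw [h2] at h1
  have h3 := pvLenSum_nonneg ((l.drop j).take (k - j))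
  linarith

lemma pvPref_fold (l : List String) : ∀ (pr : List Int) (t : Int),
    l.foldl (fun (pt : List Int × Int) s => (pt.1 ++ [pt.2 + PySem.Str.len s], pt.2 + PySem.Str.len s)) (pr, t)
    = (pr ++ (List.range l.length).map (fun j => t + pvPf l (j + 1)), t + pvPf l l.length) := by
  induction l with
  | nil => intro pr t; simp [pvPf, pvLenSum]
  | cons s l ih =>
    intro pr t
    rw [List.foldl_cons]
    show l.foldl _ (pr ++ [t + PySem.Str.len s], t + PySem.Str.len s) = _
    rw [ih]
    have htake : ∀ j : Nat, pvPf (s :: l) (j + 1) = PySem.Str.len s + pvPf l j := by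
      intro j; unfold pvPf; rw [List.take_succ_cons, pvLenSum_cons]
    have hmap : (List.range (l.length + 1)).map (fun j => t + pvPf (s :: l) (j + 1))
        = (t + PySem.Str.len s) :: (List.range l.length).map (fun j => t + PySem.Str.len s + pvPf l (j + 1)) := by
      rw [List.range_succ_eq_map, List.map_cons, List.map_map]
      refine List.cons_eq_cons.mpr ⟨?_, ?_⟩
      · show t + pvPf (s :: l) (0 + 1) = _
        rw [htake 0, pvPf_zero]; ring
      · apply List.map_congr_left
        intro j _
        show t + pvPf (s :: l) (j + 1 + 1) = _
        rw [htake (j + 1)]; ring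
    refine Prod.ext ?_ ?_
    · show pr ++ [t + PySem.Str.len s] ++ _ = pr ++ _
      simp only [List.length_cons]
      rw [hmap, List.append_assoc, List.singleton_append]
    · show t + PySem.Str.len s + pvPf l l.length = t + pvPf (s :: l) (l.length + 1)
      rw [htake l.length]; ring

lemma pvPref_eq (l : List String) :
    pvB_pref l = (List.range (l.length + 1)).map (fun k => pvPf l k) := by
  unfold pvB_pref
  rw [pvPref_fold]
  show [0] ++ (List.range l.length).map (fun j => (0 : Int) + pvPf l (j + 1)) = _
  rw [List.range_succ_eq_map, List.map_cons, List.map_map, List.singleton_append]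
  refine List.cons_eq_cons.mpr ⟨?_, ?_⟩
  · rw [pvPf_zero]
  · apply List.map_congr_left
    intro j _
    show (0 : Int) + pvPf l (j + 1) = pvPf l (j + 1)
    ring

lemma pvPref_length (l : List String) : (pvB_pref l).length = l.length + 1 := by
  rw [pvPref_eq]; simp

lemma pvPref_getD (l : List String) (k : Nat) (h : k ≤ l.length) :
    PySem.List.pyGetD (pvB_pref l) (k : Int) 0 = pvPf l k := by
  rw [PySem.List.pyGetD_natCast, pvPref_eq]
  have hk : k < ((List.range (l.length + 1)).map (fun k => pvPf l k)).length := by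
    simp; omega
  rw [List.getD_eq_getElem _ _ hk]
  simp

lemma pvScan_eq (ov : Int) : ∀ (r acc : List String) (ol : Int),
    pvA_overlapScan ov r acc ol
    = ((r.take (pvKeep ov ol r)).reverse ++ acc, ol + pvLenSum (r.take (pvKeep ov ol r))) := by
  intro r
  induction r with
  | nil => intro acc ol; simp [pvA_overlapScan, pvKeep, pvLenSum]
  | cons s r ih =>
    intro acc ol
    simp only [pvA_overlapScan, pvKeep]
    split_ifs with h
    · rw [ih, List.take_succ_cons]
      refine Prod.ext ?_ ?_
      · simp
      · show ol + PySem.Str.len s + pvLenSum _ = ol + pvLenSum (s :: _)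
        rw [pvLenSum_cons]; ring
    · rw [List.take_zero]
      simp [pvLenSum]

lemma pvKeep_le (ov : Int) : ∀ (r : List String) (ol : Int), pvKeep ov ol r ≤ r.length := by
  intro r
  induction r with
  | nil => intro ol; simp [pvKeep]
  | cons s r ih =>
    intro ol
    simp only [pvKeep, List.length_cons]
    split_ifs with h
    · have := ih (ol + PySem.Str.len s)
      omega
    · omega

lemma pvKeep_fits (ov : Int) : ∀ (r : List String) (ol : Int), ol ≤ ov →
    ol + pvLenSum (r.take (pvKeep ov ol r)) ≤ ov := by
  intro r
  induction r with
  | nil => intro ol h; simpa [pvKeep, pvLenSum] using h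
  | cons s r ih =>
    intro ol h
    simp only [pvKeep]
    split_ifs with hc
    · rw [List.take_succ_cons, pvLenSum_cons]
      have := ih (ol + PySem.Str.len s) hc
      linarith
    · rw [List.take_zero]
      simpa [pvLenSum] using h

lemma pvKeep_max (ov : Int) : ∀ (r : List String) (ol : Int) (t : Nat), t ≤ r.length →
    ol + pvLenSum (r.take t) ≤ ov → t ≤ pvKeep ov ol r := by
  intro r
  induction r with
  | nil =>
    intro ol t ht _
    simp only [List.length_nil, Nat.le_zero] at ht
    subst ht
    simp [pvKeep]
  | cons s r ih =>
    intro ol t ht hsum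
    cases t with
    | zero => omega
    | succ t =>
      rw [List.take_succ_cons, pvLenSum_cons] at hsum
      have hnn := pvLenSum_nonneg (r.take t)
      have hc : ol + PySem.Str.len s ≤ ov := by linarith
      simp only [pvKeep]
      rw [if_pos hc]
      have := ih (ol + PySem.Str.len s) t (by simpa using ht) (by linarith)
      omega

lemma pvBisect_char (W : List Int) (x : Int) (b : Nat) (hs : List.Pairwise (· ≤ ·) W)
    (hb : b < W.length) (hlow : ∀ (j : Nat) (hj : j < W.length), j < b → W[j] < x)
    (hhi : x ≤ W[b]) : PySem.List.bisectLeft W x = b := by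
  obtain ⟨h1, h2, h3⟩ := PySem.List.bisectLeft_spec W x hs
  by_contra hne
  rcases Nat.lt_or_ge (PySem.List.bisectLeft W x) b with h | h
  · have hjlt : PySem.List.bisectLeft W x < W.length := by omega
    have := h3 (PySem.List.bisectLeft W x) hjlt (le_refl _)
    have := hlow (PySem.List.bisectLeft W x) hjlt h
    linarith
  · have hlt : b < PySem.List.bisectLeft W x := by omega
    have := h2 b hb hlt
    linarith

lemma pvSuffix (l : List String) (startB k t : Nat) (hsk : startB ≤ k) (hk : k ≤ l.length)
    (ht : t ≤ k - startB) :
    pvLenSum ((((l.drop startB).take (k - startB)).reverse).take t)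
    = pvPf l k - pvPf l (k - t) := by
  have hwlen : ((l.drop startB).take (k - startB)).length = k - startB := by
    rw [List.length_take, List.length_drop]; omega
  have h1 : ((l.drop startB).take (k - startB)).reverse.take t
      = (((l.drop startB).take (k - startB)).drop (k - startB - t)).reverse := by
    rw [List.reverse_drop]
    have e0 : ((l.drop startB).take (k - startB)).length - (k - startB - t) = t := by
      rw [hwlen]; omega
    rw [e0]
  rw [h1, pvLenSum_reverse]
  have h2 : ((l.drop startB).take (k - startB)).drop (k - startB - t)
      = (l.drop (k - t)).take t := by
    rw [List.drop_take, List.drop_drop]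
    have e1 : k - startB - (k - startB - t) = t := by omega
    have e2 : startB + (k - startB - t) = k - t := by omega
    rw [e1, e2]
  rw [h2, pvPf_sub]
  have h3 : k - t + t = k := by omega
  rw [h3]

lemma pvBisect_eq (l : List String) (ov : Int) (hov : 0 < ov) (startB k : Nat)
    (hsk : startB ≤ k) (hk : k ≤ l.length) :
    startB + PySem.List.bisectLeft
        (PySem.List.slice (pvB_pref l) (some (startB : Int)) (some ((k : Int) + 1)))
        (PySem.List.pyGetD (pvB_pref l) (k : Int) 0 - ov)
    = k - pvKeep ov 0 ((l.drop startB).take (k - startB)).reverse := by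
  have hcast : ((k : Int) + 1) = ((k + 1 : Nat) : Int) := by push_cast; ring
  rw [hcast, PySem.List.slice_natCast, pvPref_getD l k hk]
  set K := pvKeep ov 0 ((l.drop startB).take (k - startB)).reverse with hKdef
  set W := ((pvB_pref l).drop startB).take (k + 1 - startB) with hWdef
  have hwlen : ((l.drop startB).take (k - startB)).length = k - startB := by simp; omega
  have hKle : K ≤ k - startB := by
    rw [hKdef]
    have := pvKeep_le ov ((l.drop startB).take (k - startB)).reverse 0
    simpa [hwlen] using this
  have hWlen : W.length = k + 1 - startB := by
    rw [hWdef]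
    simp [pvPref_length]
    omega
  have hWget : ∀ (j : Nat) (hj : j < W.length), W[j] = pvPf l (startB + j) := by
    intro j hj
    simp only [hWdef, List.getElem_take, List.getElem_drop, pvPref_eq, List.getElem_map,
      List.getElem_range]
  have hs : List.Pairwise (· ≤ ·) W := by
    rw [List.pairwise_iff_getElem]
    intro i j hi hj hij
    rw [hWget i hi, hWget j hj]
    exact pvPf_mono l (by omega)
  have hsfits := pvKeep_fits ov ((l.drop startB).take (k - startB)).reverse 0 (le_of_lt hov)
  rw [← hKdef] at hsfits
  have hKsum : pvLenSum ((((l.drop startB).take (k - startB)).reverse).take K)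
      = pvPf l k - pvPf l (k - K) := pvSuffix l startB k K hsk hk hKle
  have hblt : k - startB - K < W.length := by rw [hWlen]; omega
  have hb : PySem.List.bisectLeft W (pvPf l k - ov) = k - startB - K := by
    refine pvBisect_char W (pvPf l k - ov) (k - startB - K) hs hblt ?_ ?_
    · intro j hj hjb
      rw [hWget j hj]
      by_contra hge
      push_neg at hge
      have ht1 : k - startB - j ≤ k - startB := by omega
      have ht2 : k - (k - startB - j) = startB + j := by omega
      have hsum := pvSuffix l startB k (k - startB - j) hsk hk ht1
      rw [ht2] at hsum
      have hfit : (0 : Int) + pvLenSum ((((l.drop startB).take (k - startB)).reverse).take (k - startB - j)) ≤ ov := by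
        linarith
      have hmax := pvKeep_max ov ((l.drop startB).take (k - startB)).reverse 0 (k - startB - j)
        (by rw [List.length_reverse, hwlen]; omega) hfit
      rw [← hKdef] at hmax
      omega
    · rw [hWget (k - startB - K) hblt]
      have h5 : startB + (k - startB - K) = k - K := by omega
      rw [h5]
      linarith [hsfits, hKsum]
  rw [hb]
  omega

-- one simultaneous induction over the remaining indices: A's fold over the enumerated
-- suffix with its buffer state, B's fold over range' with its index window
lemma pvMain (l : List String) (cs ov mc : Int) : ∀ (m k : Nat)
    (chunks : List (Int × Int × List String)) (startB : Nat),
    k + m = l.length → startB ≤ k → (0 < k → startB < k) → 0 < l.length →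
    (let SA := (PySem.List.enumerate (l.drop k) (k : Int)).foldl (pvA_step cs ov mc)
        (chunks, (l.drop startB).take (k - startB), pvPf l k - pvPf l startB, (startB : Int));
     if SA.2.1 ≠ [] then SA.1 ++ [(SA.2.2.2, (l.length : Int), SA.2.1)] else SA.1)
    = (let SB := (List.range' k m).foldl (pvB_step l (pvB_pref l) cs ov mc) (chunks, startB);
       SB.1 ++ [((SB.2 : Int), (l.length : Int), PySem.List.slice l (some (SB.2 : Int)) none)]) := by
  intro m
  induction m with
  | zero =>
    intro k chunks startB hkm hsk hpos hn
    have hk : k = l.length := by omega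
    subst hk
    rw [List.drop_length, PySem.List.enumerate_nil]
    rw [List.range'_zero]
    simp only [List.foldl_nil]
    have hlt : startB < l.length := hpos hn
    have hcur : (l.drop startB).take (l.length - startB) = l.drop startB := by
      apply List.take_of_length_le
      simp
    have hne : l.drop startB ≠ [] := by
      rw [Ne, List.drop_eq_nil_iff]
      omega
    rw [hcur]
    rw [if_pos hne]
    rw [PySem.List.slice_from_natCast]
  | succ m ih =>
    intro k chunks startB hkm hsk hpos hn
    have hklt : k < l.length := by omega
    have hdropk : l.drop k = l[k] :: l.drop (k + 1) := List.drop_eq_getElem_cons hklt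
    rw [hdropk, PySem.List.enumerate_cons, List.foldl_cons, List.range'_succ, List.foldl_cons]
    have hpfk := pvPref_getD l k (by omega)
    have hpfk1 := pvPref_getD l (k + 1) (by omega)
    have hpfs := pvPref_getD l startB (by omega)
    have hpfsucc := pvPf_succ l k hklt
    have hcurne : ((l.drop startB).take (k - startB) ≠ []) ↔ startB < k := by
      rw [List.ne_nil_iff_length_pos, List.length_take, List.length_drop]
      omega
    have hcast1 : ((k : Int) + 1) = ((k + 1 : Nat) : Int) := by push_cast; ring
    -- the two guards agree
    by_cases hg : pvPf l (k + 1) - pvPf l startB > cs ∧ startB < k ∧ pvPf l k - pvPf l startB ≥ mc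
    · -- chunk is emitted
      have hgA : pvPf l k - pvPf l startB + PySem.Str.len l[k] > cs ∧
          (l.drop startB).take (k - startB) ≠ [] ∧ pvPf l k - pvPf l startB ≥ mc := by
        refine ⟨by linarith [hg.1, hpfsucc.symm.le], hcurne.mpr hg.2.1, hg.2.2⟩
      have hgB : PySem.List.pyGetD (pvB_pref l) ((k : Int) + 1) 0
            - PySem.List.pyGetD (pvB_pref l) ((startB : Nat) : Int) 0 > cs ∧ startB < k ∧
          PySem.List.pyGetD (pvB_pref l) ((k : Nat) : Int) 0
            - PySem.List.pyGetD (pvB_pref l) ((startB : Nat) : Int) 0 ≥ mc := by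
        rw [hcast1, hpfk1, hpfk, hpfs]
        exact hg
      have hslice : PySem.List.slice l (some ((startB : Nat) : Int)) (some ((k : Nat) : Int))
          = (l.drop startB).take (k - startB) := PySem.List.slice_natCast l startB k
      rw [show pvA_step cs ov mc
            (chunks, (l.drop startB).take (k - startB), pvPf l k - pvPf l startB, (startB : Int))
            ((k : Int), l[k])
          = (if ov > 0 ∧ (l.drop startB).take (k - startB) ≠ [] then
              (chunks ++ [((startB : Int), (k : Int), (l.drop startB).take (k - startB))],
               (pvA_overlapScan ov ((l.drop startB).take (k - startB)).reverse [] 0).1 ++ [l[k]],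
               (pvA_overlapScan ov ((l.drop startB).take (k - startB)).reverse [] 0).2 + PySem.Str.len l[k],
               (k : Int) - ((pvA_overlapScan ov ((l.drop startB).take (k - startB)).reverse [] 0).1.length : Int))
            else
              (chunks ++ [((startB : Int), (k : Int), (l.drop startB).take (k - startB))],
               [l[k]], PySem.Str.len l[k], (k : Int))) by
          simp only [pvA_step, if_pos hgA]]
      rw [show pvB_step l (pvB_pref l) cs ov mc (chunks, startB) k
          = (if ov > 0 then
              (chunks ++ [((startB : Int), (k : Int), PySem.List.slice l (some (startB : Int)) (some (k : Int)))],
               startB + PySem.List.bisectLeft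
                 (PySem.List.slice (pvB_pref l) (some (startB : Int)) (some ((k : Int) + 1)))
                 (PySem.List.pyGetD (pvB_pref l) (k : Int) 0 - ov))
            else
              (chunks ++ [((startB : Int), (k : Int), PySem.List.slice l (some (startB : Int)) (some (k : Int)))], k)) by
          simp only [pvB_step, if_pos hgB]]
      by_cases hov : ov > 0
      · have hcond : ov > 0 ∧ (l.drop startB).take (k - startB) ≠ [] := ⟨hov, hgA.2.1⟩
        rw [if_pos hcond, if_pos hov]
        set K := pvKeep ov 0 ((l.drop startB).take (k - startB)).reverse with hKdef
        have hwlen : ((l.drop startB).take (k - startB)).length = k - startB := by simp; omega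
        have hKle : K ≤ k - startB := by
          have := pvKeep_le ov ((l.drop startB).take (k - startB)).reverse 0
          rw [List.length_reverse, hwlen] at this
          exact this
        have hscan := pvScan_eq ov ((l.drop startB).take (k - startB)).reverse [] 0
        have hos : (pvA_overlapScan ov ((l.drop startB).take (k - startB)).reverse [] 0).1
            = (l.drop (k - K)).take K := by
          rw [hscan]
          show (((l.drop startB).take (k - startB)).reverse.take K).reverse ++ [] = _
          rw [List.append_nil]
          have h1 : ((l.drop startB).take (k - startB)).reverse.take K
              = (((l.drop startB).take (k - startB)).drop (k - startB - K)).reverse := by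
            rw [List.reverse_drop, hwlen]
            congr 1
            omega
          rw [h1, List.reverse_reverse, List.drop_take, List.drop_drop]
          have e1 : k - startB - (k - startB - K) = K := by omega
          have e2 : startB + (k - startB - K) = k - K := by omega
          rw [e1, e2]
        have hol : (pvA_overlapScan ov ((l.drop startB).take (k - startB)).reverse [] 0).2
            = pvPf l k - pvPf l (k - K) := by
          rw [hscan]
          show (0 : Int) + pvLenSum _ = _
          rw [zero_add]
          exact pvSuffix l startB k K hsk (by omega) hKle
        have hoslen : ((l.drop (k - K)).take K).length = K := by
          simp; omega
        have hbis := pvBisect_eq l ov hov startB k hsk (by omega)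
        rw [← hKdef] at hbis
        rw [hos, hol, hoslen, hslice, hbis]
        have hnext : (l.drop (k - K)).take K ++ [l[k]] = (l.drop (k - K)).take (k + 1 - (k - K)) := by
          have hkk : k + 1 - (k - K) = K + 1 := by omega
          rw [hkk, List.take_add_one]
          congr 1
          have hix : k - K + K = k := by omega
          have : (l.drop (k - K))[K]? = some l[k] := by
            rw [List.getElem?_drop, hix, List.getElem?_eq_getElem hklt]
          rw [this]
          rfl
        have hcastK : (k : Int) - (K : Int) = ((k - K : Nat) : Int) := by omega
        rw [hnext, hcastK]
        have hlen2 : pvPf l k - pvPf l (k - K) + PySem.Str.len l[k] = pvPf l (k + 1) - pvPf l (k - K) := by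
          rw [hpfsucc]; ring
        rw [hlen2]
        exact ih (k + 1) (chunks ++ [((startB : Int), (k : Int), (l.drop startB).take (k - startB))])
          (k - K) (by omega) (by omega) (fun _ => by omega) hn
      · have hncond : ¬ (ov > 0 ∧ (l.drop startB).take (k - startB) ≠ []) := fun h => hov h.1
        rw [if_neg hncond, if_neg hov]
        rw [hslice]
        have hone : ([l[k]] : List String) = (l.drop k).take (k + 1 - k) := by
          have h11 : k + 1 - k = 1 := by omega
          rw [h11, hdropk, List.take_succ_cons, List.take_zero]
        have hlen1 : PySem.Str.len l[k] = pvPf l (k + 1) - pvPf l k := by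
          rw [hpfsucc]; ring
        rw [hone, hlen1]
        exact ih (k + 1) (chunks ++ [((startB : Int), (k : Int), (l.drop startB).take (k - startB))])
          k (by omega) (by omega) (fun _ => by omega) hn
    · -- no chunk
      have hgA : ¬ (pvPf l k - pvPf l startB + PySem.Str.len l[k] > cs ∧
          (l.drop startB).take (k - startB) ≠ [] ∧ pvPf l k - pvPf l startB ≥ mc) := by
        intro h
        exact hg ⟨by linarith [h.1, hpfsucc.le], hcurne.mp h.2.1, h.2.2⟩
      have hgB : ¬ (PySem.List.pyGetD (pvB_pref l) ((k : Int) + 1) 0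
            - PySem.List.pyGetD (pvB_pref l) ((startB : Nat) : Int) 0 > cs ∧ startB < k ∧
          PySem.List.pyGetD (pvB_pref l) ((k : Nat) : Int) 0
            - PySem.List.pyGetD (pvB_pref l) ((startB : Nat) : Int) 0 ≥ mc) := by
        rw [hcast1, hpfk1, hpfk, hpfs]
        exact hg
      rw [show pvA_step cs ov mc
            (chunks, (l.drop startB).take (k - startB), pvPf l k - pvPf l startB, (startB : Int))
            ((k : Int), l[k])
          = (chunks, (l.drop startB).take (k - startB) ++ [l[k]],
             pvPf l k - pvPf l startB + PySem.Str.len l[k], (startB : Int)) by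
          simp only [pvA_step, if_neg hgA]]
      rw [show pvB_step l (pvB_pref l) cs ov mc (chunks, startB) k = (chunks, startB) by
          simp only [pvB_step, if_neg hgB]]
      have hext : (l.drop startB).take (k - startB) ++ [l[k]] = (l.drop startB).take (k + 1 - startB) := by
        have hkk : k + 1 - startB = (k - startB) + 1 := by omega
        rw [hkk, List.take_add_one]
        congr 1
        have hix : startB + (k - startB) = k := by omega
        have : (l.drop startB)[k - startB]? = some l[k] := by
          rw [List.getElem?_drop, hix, List.getElem?_eq_getElem hklt]
        rw [this]
        rfl
      have hlen1 : pvPf l k - pvPf l startB + PySem.Str.len l[k] = pvPf l (k + 1) - pvPf l startB := by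
        rw [hpfsucc]; ring
      rw [hext, hlen1]
      exact ih (k + 1) chunks startB (by omega) (by omega) (fun _ => by omega) hn

-- ===== VERDICT (by name: the statement is the Claim_ definition above) =====
theorem sentence_chunk_positions_spec : Claim_equal_sentence_chunk_positions := by
  unfold Claim_equal_sentence_chunk_positions
  intro sentences cs ov mc _
  unfold Spec_sentence_chunk_positions
  unfold sentence_chunk_positions sentence_chunk_positions_alt
  by_cases hnil : sentences = []
  · rw [if_pos hnil, if_pos hnil]
  · rw [if_neg hnil, if_neg hnil]
    have hn : 0 < sentences.length := List.length_pos_iff.mpr hnil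
    have hstart : PySem.List.enumerate sentences 0
        = PySem.List.enumerate (sentences.drop 0) ((0 : Nat) : Int) := by
      simp
    have h := pvMain sentences cs ov mc sentences.length 0 [] 0 (by omega) (by omega)
      (by omega) hn
    simp only [List.drop_zero] at hstart
    simp only at h
    rw [List.range_eq_range']
    rw [show (([], [], 0, 0) : List (Int × Int × List String) × List String × Int × Int)
        = ([], (sentences.drop 0).take (0 - 0), pvPf sentences 0 - pvPf sentences 0, ((0 : Nat) : Int)) by
        simp [pvPf]]
    rw [hstart]
    exact h
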